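-- pv_equiv track=rewrite | github.com/miliar/Code_Jam_Webscraper | solutions_python/solutions_year15_round0_nr3/861.py | build_mult_dp
-- ===== SOURCE A (Python) =====
-- mult = {('1', '1'): "1",('1', 'i'): "i", ('1', 'j'): "j", ('1', 'k'): "k",   ('i', '1'): "i", ('i', 'i'): "-1", ('i', 'j'): "k", ('i', 'k'): "-j",   ('j', '1'): "j", ('j', 'i'): "-k", ('j', 'j'): "-1", ('j', 'k'): "i",   ('k', '1'): "k", ('k', 'i'): "j", ('k', 'j'): "-i", ('k', 'k'): "-1"}
--
-- def build_mult_dp(ijk):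
-- 	n = len(ijk)
--
-- 	# dp[x][y] = multiplication of substring ijk[x:y]
-- 	dp = [ [''] * n for i in range(n) ]
--
-- 	# base case diagonal
-- 	for i in range(n):
-- 		dp[i][i] = ijk[i]
--
-- 	for i in range(0, n):
-- 		for j in range(i + 1, n):
-- 			sign = 1
-- 			prev = dp[i][j-1]
-- 			if prev[0] == '-':
-- 				sign = -1
-- 				prev = prev[1:]
-- 			result = mult[(prev, ijk[j])]
--
-- 			if result[0] == '-':
-- 				sign = sign * -1
-- 				result = result[1:]
-- 			dp[i][j] = result if sign == 1 else "-" + result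
-- 	return dp
-- ===== SOURCE B (Python) =====
-- # Quaternion-unit arithmetic on (sign, unit-index) pairs with prefix products:
-- # dp[i][j] = inverse(P[i]) * P[j+1], no string-table DP recurrence.
--
-- def _umul(a, b):
--     sa, ua = a
--     sb, ub = b
--     s = sa * sb
--     if ua == 0:
--         return (s, ub)
--     if ub == 0:
--         return (s, ua)
--     if ua == ub:
--         return (-s, 0)
--     c = 6 - ua - ub
--     if (ub - ua) % 3 == 1:
--         return (s, c)
--     return (-s, c)
--
-- def _inv(e):
--     s, u = e
--     return (s, u) if u == 0 else (-s, u)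
--
-- def _fmt(e):
--     s, u = e
--     t = "1ijk"[u]
--     return t if s == 1 else "-" + t
--
-- def build_mult_dp(ijk):
--     n = len(ijk)
--     P = [(1, 0)]
--     for c in ijk:
--         P.append(_umul(P[-1], (1, "1ijk".index(c))))
--     return [["" if j < i else _fmt(_umul(_inv(P[i]), P[j + 1])) for j in range(n)]
--             for i in range(n)]
-- ===== Notes on version B (the rewrite author's own statement) =====
-- stated objective: alternative
-- what changed: Replaces the string-keyed multiplication-table DP recurrence dp[i][j]=mult[dp[i][j-1],ijk[j]] (with manual sign-string peeling) by arithmetic on quaternion units encoded as (sign, index) pairs: one pass of left prefix products P, then each cell is inverse(P[i])*P[j+1], formatted back to the sign-strings.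
-- outside the precondition, e.g. on build_mult_dp('x'): A returns [['x']], B raises ValueError; on build_mult_dp('ix'): A raises KeyError, B raises ValueError
import Mathlib
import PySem

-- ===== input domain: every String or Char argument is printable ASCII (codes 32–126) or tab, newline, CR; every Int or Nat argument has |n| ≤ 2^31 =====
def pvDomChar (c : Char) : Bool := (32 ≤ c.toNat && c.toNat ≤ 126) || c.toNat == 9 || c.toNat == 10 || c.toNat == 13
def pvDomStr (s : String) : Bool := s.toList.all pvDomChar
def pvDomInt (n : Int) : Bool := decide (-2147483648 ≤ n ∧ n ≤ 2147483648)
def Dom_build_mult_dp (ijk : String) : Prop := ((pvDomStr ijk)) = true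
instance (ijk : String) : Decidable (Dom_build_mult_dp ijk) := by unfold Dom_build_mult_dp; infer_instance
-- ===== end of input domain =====

-- B replaces the string-table DP recurrence by quaternion-unit arithmetic on (sign, index)
-- pairs: prefix products P, each cell = inverse(P[i]) * P[j+1] (objective: alternative).

-- ===== PORT A =====
def pvMult : PySem.Dict (String × Char) String :=
  PySem.Dict.ofList [(("1",'1'),"1"), (("1",'i'),"i"), (("1",'j'),"j"), (("1",'k'),"k"),
    (("i",'1'),"i"), (("i",'i'),"-1"), (("i",'j'),"k"), (("i",'k'),"-j"),
    (("j",'1'),"j"), (("j",'i'),"-k"), (("j",'j'),"-1"), (("j",'k'),"i"),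
    (("k",'1'),"k"), (("k",'i'),"j"), (("k",'j'),"-i"), (("k",'k'),"-1")]

-- body of A's inner loop: sign peeling, table lookup, sign re-attachment
def pvCellA (prev : String) (cj : Char) : String :=
  let sign : Int := 1
  let sp := if PySem.Str.pyGet? prev 0 = some '-' then ((-1 : Int), PySem.Str.slice prev (some 1) none)
            else (sign, prev)
  let result := PySem.Dict.getD pvMult (sp.2, cj) ""      -- KeyError on a missing key: excluded by Pre_
  let sr := if PySem.Str.pyGet? result 0 = some '-' then (sp.1 * -1, PySem.Str.slice result (some 1) none)
            else (sp.1, result)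
  if sr.1 = 1 then sr.2 else "-" ++ sr.2

def pvDiagStep (ijk : String) (dp : List (List String)) (i : Int) : List (List String) :=
  PySem.List.pySetD dp i (PySem.List.pySetD (PySem.List.pyGetD dp i []) i
    (String.ofList [(PySem.Str.pyGet? ijk i).getD ' ']))

def pvInnerStep (ijk : String) (i : Int) (dp : List (List String)) (j : Int) : List (List String) :=
  PySem.List.pySetD dp i (PySem.List.pySetD (PySem.List.pyGetD dp i []) j
    (pvCellA (PySem.List.pyGetD (PySem.List.pyGetD dp i []) (j-1) "")
             ((PySem.Str.pyGet? ijk j).getD ' ')))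

def build_mult_dp (ijk : String) : List (List String) :=
  let n : Int := PySem.Str.len ijk
  let dp : List (List String) := (PySem.List.pyRange 0 n 1).map (fun _ => PySem.List.pyRepeat [""] n)
  let dp := (PySem.List.pyRange 0 n 1).foldl (pvDiagStep ijk) dp
  let dp := (PySem.List.pyRange 0 n 1).foldl
      (fun dp i => (PySem.List.pyRange (i+1) n 1).foldl (pvInnerStep ijk i) dp) dp
  dp

-- ===== PORT B =====
def pvUmul (a b : Int × Int) : Int × Int :=
  let s := a.1 * b.1
  if a.2 = 0 then (s, b.2)
  else if b.2 = 0 then (s, a.2)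
  else if a.2 = b.2 then (-s, 0)
  else
    let c := 6 - a.2 - b.2
    if PySem.Int.mod (b.2 - a.2) 3 = 1 then (s, c) else (-s, c)

def pvInv (e : Int × Int) : Int × Int := if e.2 = 0 then e else (-e.1, e.2)

def pvFmt (e : Int × Int) : String :=
  let t := String.ofList [(PySem.Str.pyGet? "1ijk" e.2).getD ' ']
  if e.1 = 1 then t else "-" ++ t

def pvIdx (c : Char) : Int := ((PySem.List.index? "1ijk".toList c).getD 0 : Nat)
-- "1ijk".index(c): ValueError when c is absent — excluded by Pre_

def build_mult_dp_alt (ijk : String) : List (List String) :=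
  let n : Int := PySem.Str.len ijk
  let P : List (Int × Int) := ijk.toList.foldl
      (fun P c => P ++ [pvUmul (PySem.List.pyGetD P (-1) (1, 0)) (1, pvIdx c)]) [((1 : Int), (0 : Int))]
  (PySem.List.pyRange 0 n 1).map (fun i =>
    (PySem.List.pyRange 0 n 1).map (fun j =>
      if j < i then ""
      else pvFmt (pvUmul (pvInv (PySem.List.pyGetD P i (1, 0))) (PySem.List.pyGetD P (j + 1) (1, 0)))))

-- ===== PRECONDITION & SPEC =====
-- Pre_ admits exactly the strings over the quaternion alphabet {'1','i','j','k'}: on any other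
-- character A raises KeyError once the string has length ≥ 2, and on a shorter string it only
-- returns the raw character by accident of never entering the loop (B raises ValueError there).
def Pre_build_mult_dp (ijk : String) : Prop :=
  (ijk.toList.all (fun c => c == '1' || c == 'i' || c == 'j' || c == 'k')) = true
instance (ijk : String) : Decidable (Pre_build_mult_dp ijk) := by unfold Pre_build_mult_dp; infer_instance

def pvWitness_build_mult_dp : String := "k1ij"

def Spec_build_mult_dp (ijk : String) (out : List (List String)) : Prop := out = build_mult_dp_alt ijk
instance (ijk : String) (out : List (List String)) : Decidable (Spec_build_mult_dp ijk out) := by unfold Spec_build_mult_dp; infer_instance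

-- ===== CLAIM (what is proved, stated in full; the proofs are below) =====
def Claim_equal_build_mult_dp : Prop := ∀ (ijk : String), Dom_build_mult_dp ijk → Pre_build_mult_dp ijk → Spec_build_mult_dp ijk (build_mult_dp ijk)

-- ===== LEMMAS AND PROOFS =====

-- the eight signed quaternion units in B's encoding
def pvV : List (Int × Int) := [(1,0),(1,1),(1,2),(1,3),(-1,0),(-1,1),(-1,2),(-1,3)]

def pvValid (c : Char) : Prop := c = '1' ∨ c = 'i' ∨ c = 'j' ∨ c = 'k'

-- prefix product of a character list
def pvPref (s : List Char) : Int × Int := s.foldl (fun e c => pvUmul e (1, pvIdx c)) (1, 0)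

-- B's value of cell (i, j)
def pvBval (s : List Char) (i j : Nat) : String :=
  pvFmt (pvUmul (pvInv (pvPref (s.take i))) (pvPref (s.take (j + 1))))

lemma pv_closure : ∀ a ∈ pvV, ∀ b ∈ pvV, pvUmul a b ∈ pvV := by decide
lemma pv_assoc : ∀ a ∈ pvV, ∀ b ∈ pvV, ∀ c ∈ pvV, pvUmul (pvUmul a b) c = pvUmul a (pvUmul b c) := by decide
lemma pv_inv_cancel : ∀ p ∈ pvV, ∀ x ∈ pvV, pvUmul (pvInv p) (pvUmul p x) = x := by decide
lemma pv_inv_mem : ∀ p ∈ pvV, pvInv p ∈ pvV := by decide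
lemma pv_unit_mem (c : Char) (hc : pvValid c) : ((1 : Int), pvIdx c) ∈ pvV := by
  rcases hc with h | h | h | h <;> subst h <;> decide
lemma pv_cell_step : ∀ e ∈ pvV, ∀ c, pvValid c →
    pvCellA (pvFmt e) c = pvFmt (pvUmul e (1, pvIdx c)) := by
  intro e he c hc
  rcases hc with h | h | h | h <;> subst h <;> fin_cases he <;> decide
lemma pv_fmt_unit (c : Char) (hc : pvValid c) : pvFmt ((1 : Int), pvIdx c) = String.ofList [c] := by
  rcases hc with h | h | h | h <;> subst h <;> decide

lemma pv_pref_append (s : List Char) (c : Char) :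
    pvPref (s ++ [c]) = pvUmul (pvPref s) (1, pvIdx c) := by
  simp [pvPref, List.foldl_append]

lemma pv_pref_mem (s : List Char) (hs : ∀ c ∈ s, pvValid c) : pvPref s ∈ pvV := by
  induction s using List.reverseRecOn with
  | nil => decide
  | append_singleton s c ih =>
      rw [pv_pref_append]
      exact pv_closure _ (ih (fun d hd => hs d (by simp [hd]))) _
        (pv_unit_mem c (hs c (by simp)))

-- the list P built by B's loop is the list of prefix products
lemma pv_foldP_eq (s : List Char) :
    s.foldl (fun P c => P ++ [pvUmul (PySem.List.pyGetD P (-1) (1, 0)) (1, pvIdx c)]) [((1 : Int), (0 : Int))]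
      = (List.range (s.length + 1)).map (fun m => pvPref (s.take m)) := by
  induction s using List.reverseRecOn with
  | nil => decide
  | append_singleton s c ih =>
      rw [List.foldl_append, ih]
      have hsplit : (List.range (s.length + 1)).map (fun m => pvPref (s.take m))
          = (List.range s.length).map (fun m => pvPref (s.take m)) ++ [pvPref s] := by
        rw [List.range_succ, List.map_append]; simp
      rw [List.foldl_cons, List.foldl_nil, hsplit, List.append_assoc,
          PySem.List.pyGetD_neg_one_append_singleton, ← List.append_assoc, ← hsplit]
      have hbig : (List.range (s.length + 1 + 1)).map (fun m => pvPref ((s ++ [c]).take m))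
          = (List.range (s.length + 1)).map (fun m => pvPref ((s ++ [c]).take m))
            ++ [pvPref ((s ++ [c]).take (s.length + 1))] := by
        rw [List.range_succ, List.map_append]; simp
      simp only [List.length_append, List.length_singleton, hbig]
      congr 1
      · apply List.map_congr_left
        intro m hm
        rw [List.take_append_of_le_length (Nat.le_of_lt_succ (List.mem_range.mp hm))]
      · have hlen : (s ++ [c]).length = s.length + 1 := by simp
        rw [← hlen, List.take_length, pv_pref_append]

-- row-level body of A's inner loop (what pvInnerStep does to row i)
def pvRowStep (ijk : String) (row : List String) (j : Int) : List String :=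
  PySem.List.pySetD row j (pvCellA (PySem.List.pyGetD row (j - 1) "")
    ((PySem.Str.pyGet? ijk j).getD ' '))

lemma pv_get_maprange {α : Type} (f : Nat → α) (n k : Nat) (d : α) (hk : k < n) :
    PySem.List.pyGetD ((List.range n).map f) (k : Int) d = f k := by
  rw [PySem.List.pyGetD_natCast, List.getD_eq_getElem?_getD, List.getElem?_map]
  simp [hk]

lemma pv_set_maprange {α : Type} (f : Nat → α) (n m : Nat) (v : α) :
    PySem.List.pySetD ((List.range n).map f) (m : Int) v
      = (List.range n).map (fun j => if j = m then v else f j) := by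
  rw [PySem.List.pySetD_natCast]
  apply List.ext_getElem (by simp)
  intro k h1 h2
  have hk : k < n := by simpa using h2
  rw [List.getElem_set]
  by_cases hkm : m = k <;> simp [hkm, eq_comm]

lemma pv_getP (s : List Char) (k : Nat) (hk : k ≤ s.length) :
    PySem.List.pyGetD ((List.range (s.length + 1)).map (fun m => pvPref (s.take m))) (k : Int) (1, 0)
      = pvPref (s.take k) := by
  exact pv_get_maprange _ _ _ _ (Nat.lt_succ_of_le hk)

-- B's port computes the pvBval table
lemma pv_alt_eq (ijk : String) :
    build_mult_dp_alt ijk = (List.range ijk.toList.length).map (fun i =>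
      (List.range ijk.toList.length).map (fun j =>
        if j < i then "" else pvBval ijk.toList i j)) := by
  simp only [build_mult_dp_alt]
  rw [pv_foldP_eq, PySem.Str.len_eq, PySem.List.pyRange_zero_natCast, List.map_map]
  apply List.map_congr_left
  intro i hi
  simp only [Function.comp_apply]
  rw [List.map_map]
  apply List.map_congr_left
  intro j hj
  simp only [Function.comp_apply]
  rw [pv_getP _ i (le_of_lt (by simpa using hi))]
  have hj1 : ((j : Int) + 1) = ((j + 1 : Nat) : Int) := by push_cast; ring
  rw [hj1, pv_getP _ (j + 1) (by simpa using hj)]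
  simp [pvBval, Nat.cast_lt]

-- a fold whose iteration i only rewrites row i, elementwise
lemma pv_rowfold (B : List (List String) → Int → List (List String))
    (u : Int → List String → List String)
    (hB : ∀ (dp : List (List String)) (i : Int), 0 ≤ i → i < (dp.length : Int) →
      B dp i = PySem.List.pySetD dp i (u i (PySem.List.pyGetD dp i []))) :
    ∀ (mm : Nat) (a b : Int) (dp : List (List String)), 0 ≤ a → b ≤ (dp.length : Int) →
      (b - a).toNat = mm → ∀ (k : Nat),
      ((PySem.List.pyRange a b 1).foldl B dp)[k]? =
        if a ≤ (k : Int) ∧ (k : Int) < b then dp[k]?.map (u (k : Int)) else dp[k]? := by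
  intro mm
  induction mm with
  | zero =>
      intro a b dp ha hb hm k
      rw [PySem.List.pyRange_one_eq_nil (by omega), List.foldl_nil, if_neg (by omega)]
  | succ m ih =>
      intro a b dp ha hb hm k
      have hab : a < b := by omega
      have halen : a < (dp.length : Int) := by omega
      rw [PySem.List.pyRange_one_cons hab, List.foldl_cons, hB dp a ha halen,
          PySem.List.pySetD_of_nonneg _ _ ha, PySem.List.pyGetD_eq_getElem _ _ ha halen]
      rw [ih (a + 1) b _ (by omega) (by rw [List.length_set]; omega) (by omega) k]
      rw [List.getElem?_set]
      by_cases hk : a.toNat = k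
      · have hklen : k < dp.length := by omega
        rw [if_pos hk, if_pos (show a.toNat < dp.length by omega),
            if_neg (show ¬(a + 1 ≤ (k : Int) ∧ (k : Int) < b) by omega),
            if_pos (show a ≤ (k : Int) ∧ (k : Int) < b by omega)]
        rw [List.getElem?_eq_getElem hklen, Option.map_some]
        have hka : a = (k : Int) := by omega
        subst hka
        simp
      · rw [if_neg hk]
        by_cases hc : a + 1 ≤ (k : Int) ∧ (k : Int) < b
        · rw [if_pos hc, if_pos ⟨by omega, hc.2⟩]
        · rw [if_neg hc, if_neg ?_]
          intro h
          exact hc ⟨by omega, h.2⟩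

-- the inner loop only rewrites row i: collapse it to a row-level fold
lemma pv_inner_collapse (ijk : String) (i : Int) (hi0 : 0 ≤ i) :
    ∀ (l : List Int) (dp : List (List String)), i < (dp.length : Int) →
      l.foldl (pvInnerStep ijk i) dp
        = PySem.List.pySetD dp i (l.foldl (pvRowStep ijk) (PySem.List.pyGetD dp i [])) := by
  intro l
  induction l with
  | nil =>
      intro dp hlen
      rw [List.foldl_nil, List.foldl_nil, PySem.List.pySetD_of_nonneg _ _ hi0,
          PySem.List.pyGetD_eq_getElem _ _ hi0 hlen, List.set_getElem_self]
  | cons j l ih =>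
      intro dp hlen
      have hstep : pvInnerStep ijk i dp j
          = PySem.List.pySetD dp i (pvRowStep ijk (PySem.List.pyGetD dp i []) j) := rfl
      rw [List.foldl_cons, List.foldl_cons, hstep]
      rw [ih _ (by rw [PySem.List.length_pySetD]; exact hlen)]
      have hset : PySem.List.pySetD dp i (pvRowStep ijk (PySem.List.pyGetD dp i []) j)
          = dp.set i.toNat (pvRowStep ijk (PySem.List.pyGetD dp i []) j) :=
        PySem.List.pySetD_of_nonneg _ _ hi0
      have hgd : PySem.List.pyGetD (PySem.List.pySetD dp i
            (pvRowStep ijk (PySem.List.pyGetD dp i []) j)) i []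
          = pvRowStep ijk (PySem.List.pyGetD dp i []) j := by
        rw [hset, PySem.List.pyGetD_eq_getElem _ _ hi0 (by rw [List.length_set]; exact hlen)]
        exact List.getElem_set_self _
      rw [hgd, hset, PySem.List.pySetD_of_nonneg _ _ hi0, PySem.List.pySetD_of_nonneg _ _ hi0,
          List.set_set]

-- membership facts
lemma pv_bval_mem (s : List Char) (hs : ∀ c ∈ s, pvValid c) (i m : Nat) :
    pvUmul (pvInv (pvPref (s.take i))) (pvPref (s.take m)) ∈ pvV := by
  have h1 : pvPref (s.take i) ∈ pvV :=
    pv_pref_mem _ (fun c hc => hs c (List.mem_of_mem_take hc))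
  have h2 : pvPref (s.take m) ∈ pvV :=
    pv_pref_mem _ (fun c hc => hs c (List.mem_of_mem_take hc))
  exact pv_closure _ (pv_inv_mem _ h1) _ h2

-- one inner-loop pass over row i produces B's row
lemma pv_row (ijk : String) (hpre : ∀ c ∈ ijk.toList, pvValid c) (i : Nat)
    (_hi : i < ijk.toList.length) :
    ∀ (mm m : Nat), i < m → m ≤ ijk.toList.length → ijk.toList.length - m = mm →
      (PySem.List.pyRange (m : Int) (ijk.toList.length : Int) 1).foldl (pvRowStep ijk)
        ((List.range ijk.toList.length).map
          (fun j => if i ≤ j ∧ j < m then pvBval ijk.toList i j else ""))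
      = (List.range ijk.toList.length).map
          (fun j => if j < i then "" else pvBval ijk.toList i j) := by
  intro mm
  induction mm with
  | zero =>
      intro m him hmn hdiff
      have hm : m = ijk.toList.length := by omega
      subst hm
      rw [PySem.List.pyRange_one_eq_nil (le_refl _), List.foldl_nil]
      apply List.map_congr_left
      intro j hj
      have hjn : j < ijk.toList.length := by simpa using hj
      by_cases hji : j < i
      · rw [if_neg (by omega), if_pos hji]
      · rw [if_pos (by omega), if_neg hji]
  | succ mm ih =>
      intro m him hmn hdiff
      have hmlt : m < ijk.toList.length := by omega
      rw [PySem.List.pyRange_one_cons (by exact_mod_cast hmlt), List.foldl_cons]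
      have hstep : pvRowStep ijk
          ((List.range ijk.toList.length).map
            (fun j => if i ≤ j ∧ j < m then pvBval ijk.toList i j else "")) (m : Int)
          = (List.range ijk.toList.length).map
            (fun j => if i ≤ j ∧ j < m + 1 then pvBval ijk.toList i j else "") := by
        unfold pvRowStep
        have hidx : ((m : Int) - 1) = ((m - 1 : Nat) : Int) := by omega
        rw [hidx, pv_get_maprange _ _ _ _ (show m - 1 < ijk.toList.length by omega),
            if_pos (show i ≤ m - 1 ∧ m - 1 < m by omega)]
        rw [PySem.Str.pyGet?_natCast, List.getElem?_eq_getElem hmlt, Option.getD_some]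
        have hcell : pvCellA (pvBval ijk.toList i (m - 1)) (ijk.toList[m])
            = pvBval ijk.toList i m := by
          have hx := pv_bval_mem ijk.toList hpre i (m - 1 + 1)
          rw [show m - 1 + 1 = m from by omega] at hx
          unfold pvBval
          rw [show m - 1 + 1 = m from by omega]
          rw [pv_cell_step _ hx _ (hpre _ (List.getElem_mem hmlt))]
          congr 1
          rw [pv_assoc _ (pv_inv_mem _ (pv_pref_mem _ (fun c hc => hpre c (List.mem_of_mem_take hc))))
                _ (pv_pref_mem _ (fun c hc => hpre c (List.mem_of_mem_take hc)))
                _ (pv_unit_mem _ (hpre _ (List.getElem_mem hmlt)))]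
          congr 1
          have htake : ijk.toList.take (m + 1) = ijk.toList.take m ++ [ijk.toList[m]] := by
            rw [List.take_add_one, List.getElem?_eq_getElem hmlt, Option.toList_some]
          rw [htake, pv_pref_append]
        rw [hcell, pv_set_maprange]
        apply List.map_congr_left
        intro j _
        by_cases hjm : j = m
        · subst hjm
          rw [if_pos rfl, if_pos (by omega)]
        · rw [if_neg hjm]
          by_cases hc2 : i ≤ j ∧ j < m
          · rw [if_pos hc2, if_pos (by omega)]
          · rw [if_neg hc2, if_neg (by omega)]
      rw [hstep]
      have hcast : ((m : Int) + 1) = ((m + 1 : Nat) : Int) := by push_cast; ring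
      rw [hcast, ih (m + 1) (by omega) (by omega) (by omega)]

lemma pv_chr_eq (ijk : String) (hpre : ∀ c ∈ ijk.toList, pvValid c) (k : Nat)
    (hk : k < ijk.toList.length) :
    String.ofList [(PySem.Str.pyGet? ijk (k : Int)).getD ' '] = pvBval ijk.toList k k := by
  rw [PySem.Str.pyGet?_natCast, List.getElem?_eq_getElem hk, Option.getD_some]
  unfold pvBval
  have htake : ijk.toList.take (k + 1) = ijk.toList.take k ++ [ijk.toList[k]] := by
    rw [List.take_add_one, List.getElem?_eq_getElem hk, Option.toList_some]
  rw [htake, pv_pref_append,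
      pv_inv_cancel _ (pv_pref_mem _ (fun c hc => hpre c (List.mem_of_mem_take hc)))
        _ (pv_unit_mem _ (hpre _ (List.getElem_mem hk)))]
  exact (pv_fmt_unit _ (hpre _ (List.getElem_mem hk))).symm

-- the initial table of A
lemma pv_getElem?_maprange {α : Type} (f : Nat → α) (n k : Nat) :
    ((List.range n).map f)[k]? = if k < n then some (f k) else none := by
  rw [List.getElem?_map]
  by_cases hk : k < n
  · rw [List.getElem?_range hk, if_pos hk, Option.map_some]
  · rw [List.getElem?_eq_none (by simpa using Nat.le_of_not_lt hk), if_neg hk]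
    rfl

lemma pv_dp0_eq (ijk : String) :
    (PySem.List.pyRange 0 (PySem.Str.len ijk) 1).map
        (fun _ => PySem.List.pyRepeat [""] (PySem.Str.len ijk))
      = (List.range ijk.toList.length).map (fun _ => List.replicate ijk.toList.length "") := by
  rw [PySem.Str.len_eq, PySem.List.pyRange_zero_natCast, List.map_map,
      PySem.List.pyRepeat_singleton]
  simp only [Int.toNat_natCast, Function.comp_def]

-- the table after A's diagonal loop
lemma pv_diag_eq (ijk : String) :
    (PySem.List.pyRange 0 (PySem.Str.len ijk) 1).foldl (pvDiagStep ijk)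
        ((PySem.List.pyRange 0 (PySem.Str.len ijk) 1).map
          (fun _ => PySem.List.pyRepeat [""] (PySem.Str.len ijk)))
      = (List.range ijk.toList.length).map (fun (i : Nat) => (List.range ijk.toList.length).map
          (fun (j : Nat) => if j = i then String.ofList [(PySem.Str.pyGet? ijk (i : Int)).getD ' ']
                    else "")) := by
  apply List.ext_getElem?
  intro k
  rw [pv_dp0_eq]
  rw [pv_rowfold (pvDiagStep ijk)
      (fun i row => PySem.List.pySetD row i (String.ofList [(PySem.Str.pyGet? ijk i).getD ' ']))
      (fun dp i _ _ => rfl)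
      ((PySem.Str.len ijk - 0).toNat) 0 (PySem.Str.len ijk) _ le_rfl
      (by simp [PySem.Str.len_eq]) rfl k]
  rw [PySem.Str.len_eq, pv_getElem?_maprange, pv_getElem?_maprange]
  by_cases hk : k < ijk.toList.length
  · rw [if_pos ⟨Int.natCast_nonneg k, by exact_mod_cast hk⟩, if_pos hk, if_pos hk,
        Option.map_some]
    congr 1
    rw [show List.replicate ijk.toList.length "" = (List.range ijk.toList.length).map (fun _ => "")
          from by rw [List.map_const', List.length_range]]
    rw [pv_set_maprange]
  · rw [if_neg (fun h => hk (by exact_mod_cast h.2)), if_neg hk, if_neg hk]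

theorem build_mult_dp_spec : Claim_equal_build_mult_dp := by
  intro ijk _hdom hpreB
  have hpre : ∀ c ∈ ijk.toList, pvValid c := by
    intro c hc
    have h := List.all_eq_true.mp hpreB c hc
    simp only [Bool.or_eq_true, beq_iff_eq] at h
    unfold pvValid; tauto
  show build_mult_dp ijk = build_mult_dp_alt ijk
  rw [pv_alt_eq]
  simp only [build_mult_dp]
  rw [pv_diag_eq]
  apply List.ext_getElem?
  intro k
  rw [pv_rowfold
      (fun dp i => (PySem.List.pyRange (i + 1) (PySem.Str.len ijk) 1).foldl (pvInnerStep ijk i) dp)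
      (fun i row => (PySem.List.pyRange (i + 1) (PySem.Str.len ijk) 1).foldl (pvRowStep ijk) row)
      (fun dp i h0i hlen => pv_inner_collapse ijk i h0i _ dp hlen)
      ((PySem.Str.len ijk - 0).toNat) 0 (PySem.Str.len ijk) _ le_rfl
      (by simp [PySem.Str.len_eq]) rfl k]
  rw [PySem.Str.len_eq, pv_getElem?_maprange, pv_getElem?_maprange]
  by_cases hk : k < ijk.toList.length
  · rw [if_pos ⟨Int.natCast_nonneg k, by exact_mod_cast hk⟩, if_pos hk, if_pos hk,
        Option.map_some]
    congr 1
    have hrowstart : (List.range ijk.toList.length).map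
        (fun j => if j = k then String.ofList [(PySem.Str.pyGet? ijk (k : Int)).getD ' '] else "")
        = (List.range ijk.toList.length).map
          (fun j => if k ≤ j ∧ j < k + 1 then pvBval ijk.toList k j else "") := by
      apply List.map_congr_left
      intro j _
      by_cases hjk : j = k
      · subst hjk
        rw [if_pos rfl, if_pos (by omega), pv_chr_eq ijk hpre j hk]
      · rw [if_neg hjk, if_neg (by omega)]
    rw [hrowstart]
    rw [show ((k : Int) + 1) = ((k + 1 : Nat) : Int) from by push_cast; ring]
    exact pv_row ijk hpre k hk (ijk.toList.length - (k + 1)) (k + 1) (by omega) (by omega) rfl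
  · rw [if_neg (fun h => hk (by exact_mod_cast h.2)), if_neg hk, if_neg hk]
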